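-- pv_equiv track=rewrite | github.com/muursh/cryptopals | challenge8.py | calc
-- ===== SOURCE A (Python) =====
-- import itertools
--
-- def calc(line):
--     sets = [line[i:i+32] for i in range(0, len(line), 32)]
--     pairs = itertools.combinations(sets, 2)
--     identical = 0
--     for p in pairs:
--         if p[0] == p[1]:
--             identical += 1
--     return identical
-- ===== SOURCE B (Python) =====
-- def calc(line):
--     identical = 0
--     seen = {}
--     for i in range(0, len(line), 32):
--         block = line[i:i+32]
--         prev = seen.get(block, 0)
--         identical += prev
--         seen[block] = prev + 1
--     return identical
-- ===== Notes on version B (the rewrite author's own statement) =====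
-- stated objective: faster
-- what changed: Replaces the quadratic scan over all itertools.combinations pairs by a single pass that keeps a dict of block counts and adds, for each block, the number of earlier identical blocks.
import Mathlib
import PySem

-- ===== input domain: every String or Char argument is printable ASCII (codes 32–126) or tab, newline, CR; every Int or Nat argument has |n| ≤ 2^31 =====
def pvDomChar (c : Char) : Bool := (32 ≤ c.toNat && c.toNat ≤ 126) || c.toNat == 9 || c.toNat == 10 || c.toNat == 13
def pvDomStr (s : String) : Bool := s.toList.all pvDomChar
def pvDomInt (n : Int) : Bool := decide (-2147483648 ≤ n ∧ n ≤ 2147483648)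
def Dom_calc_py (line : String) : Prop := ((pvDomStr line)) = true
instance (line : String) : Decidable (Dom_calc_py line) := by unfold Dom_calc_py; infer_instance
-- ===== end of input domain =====

-- B replaces A's scan over all block pairs by one counting-dict pass (measured asymptotically faster).

-- ===== PORT A =====
def calc_py (line : String) : Int :=
  let sets := (PySem.List.pyRange 0 (PySem.Str.len line) 32).map
    (fun i => PySem.Str.slice line (some i) (some (i + 32)))
  let pairs := PySem.List.combinations sets 2
  pairs.foldl
    (fun identical p =>
      if PySem.List.pyGetD p 0 "" == PySem.List.pyGetD p 1 "" then identical + 1 else identical) 0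

-- ===== PORT B =====
def calc_py_alt (line : String) : Int :=
  ((PySem.List.pyRange 0 (PySem.Str.len line) 32).foldl
    (fun (st : PySem.Dict String Int × Int) i =>
      let block := PySem.Str.slice line (some i) (some (i + 32))
      let prev := st.1.getD block 0
      (st.1.insert block (prev + 1), st.2 + prev))
    (PySem.Dict.empty, 0)).2

-- ===== PRECONDITION & SPEC =====
def Spec_calc_py (line : String) (out : Int) : Prop := out = calc_py_alt line
instance (line : String) (out : Int) : Decidable (Spec_calc_py line out) := by unfold Spec_calc_py; infer_instance

-- ===== CLAIM (what is proved, stated in full; the proofs are below) =====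
def Claim_equal_calc_py : Prop := ∀ (line : String), Dom_calc_py line → Spec_calc_py line (calc_py line)

-- ===== LEMMAS AND PROOFS =====

-- A's pair count, characterised recursively: each head block pairs with its later duplicates.
def pvCntA : List String → Int
  | [] => 0
  | x :: xs => (xs.count x : Int) + pvCntA xs

-- B's remaining contribution when the dict is d and the remaining blocks are cs.
def pvW (d : PySem.Dict String Int) : List String → Int
  | [] => 0
  | b :: cs => d.getD b 0 + pvW (d.insert b (d.getD b 0 + 1)) cs

lemma pvCntA_append_singleton (xs : List String) (b : String) :
    pvCntA (xs ++ [b]) = pvCntA xs + (xs.count b : Int) := by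
  induction xs with
  | nil => simp [pvCntA]
  | cons x xs ih =>
      simp only [List.cons_append, pvCntA, ih, List.count_append, List.count_cons, List.count_nil]
      rw [Bool.beq_comm]; push_cast; ring

-- A's inner pass for head block x: the pairs (x, y) contribute the later duplicates of x.
lemma pvA_head (x : String) (xs : List String) (init : Int) :
    List.foldl
      (fun identical p =>
        if PySem.List.pyGetD p 0 "" == PySem.List.pyGetD p 1 "" then identical + 1 else identical)
      init ((PySem.List.combinations xs 1).map (x :: ·))
      = init + (xs.count x : Int) := by
  rw [List.foldl_map, PySem.List.combinations_one, List.foldl_map]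
  simp only [PySem.List.pyGetD_zero_cons]
  simp only [pysem]
  simp [List.count, List.countP_eq_length_filter, Bool.beq_comm]

lemma pvA_foldl_eq (cs : List String) (init : Int) :
    (PySem.List.combinations cs 2).foldl
      (fun identical p =>
        if PySem.List.pyGetD p 0 "" == PySem.List.pyGetD p 1 "" then identical + 1 else identical)
      init = init + pvCntA cs := by
  induction cs generalizing init with
  | nil => simp [PySem.List.combinations_nil_succ, pvCntA]
  | cons x xs ih =>
      rw [show (2 : Nat) = 1 + 1 from rfl, PySem.List.combinations_cons_succ,
        List.foldl_append, pvA_head, ih, pvCntA]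
      ring

lemma pvB_foldl_snd (cs : List String) (d : PySem.Dict String Int) (acc : Int) :
    (cs.foldl
      (fun (st : PySem.Dict String Int × Int) b =>
        (st.1.insert b (st.1.getD b 0 + 1), st.2 + st.1.getD b 0)) (d, acc)).2
      = acc + pvW d cs := by
  induction cs generalizing d acc with
  | nil => simp [pvW]
  | cons b cs ih => simp [List.foldl_cons, ih, pvW]; ring

lemma pvW_counter (cs pre : List String) :
    pvCntA pre + pvW (PySem.Dict.counter pre) cs = pvCntA (pre ++ cs) := by
  induction cs generalizing pre with
  | nil => simp [pvW]
  | cons b cs ih =>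
      have hins : (PySem.Dict.counter pre).insert b ((PySem.Dict.counter pre).getD b 0 + 1)
          = PySem.Dict.counter (pre ++ [b]) := by
        rw [← PySem.Dict.foldl_insert_getD_add_one_eq_counter,
            ← PySem.Dict.foldl_insert_getD_add_one_eq_counter, List.foldl_append]
        simp
      rw [pvW, hins, PySem.Dict.getD_counter]
      have := ih (pre ++ [b])
      rw [pvCntA_append_singleton] at this
      have hassoc : pre ++ [b] ++ cs = pre ++ b :: cs := by simp
      rw [hassoc] at this
      omega

-- ===== VERDICT (by name: the statement is the Claim_ definition above) =====
theorem calc_py_spec : Claim_equal_calc_py := by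
  intro line _
  unfold Spec_calc_py calc_py calc_py_alt
  dsimp only
  have hB := pvB_foldl_snd
    ((PySem.List.pyRange 0 (PySem.Str.len line) 32).map
      (fun i => PySem.Str.slice line (some i) (some (i + 32))))
    PySem.Dict.empty 0
  simp only [List.foldl_map] at hB
  rw [hB, pvA_foldl_eq]
  have h := pvW_counter
    ((PySem.List.pyRange 0 (PySem.Str.len line) 32).map
      (fun i => PySem.Str.slice line (some i) (some (i + 32)))) []
  simp only [pvCntA, List.nil_append] at h
  simpa [PySem.Dict.counter] using h.symm
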